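-- pv_equiv track=rewrite | github.com/dmytro010/abtka | scripts/build_site.py | extract_backlink
-- ===== SOURCE A (Python) =====
-- from typing import Dict, List, Tuple
--
-- CATEGORY_PAGES = {
--     "text": {"href": "robota-z-textom-na-mac.html", "label": "Робота з текстом на мак"},
--     "files": {"href": "robota-z-faylami-na-mac.html", "label": "Робота з файлами на мак"},
--     "apps": {"href": "robota-z-programami-na-mac.html", "label": "Робота з програмами на мак"},
--     "keyboard": {"href": "klaviatura_mac.html", "label": "Клавіатура Mac"},
--     "safari": {"href": "poradi-brauzer-safari-na-mak.html", "label": "Поради по Safari"},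
--     "media": {"href": "robota_z_foto_na_mac.html", "label": "Медіа та система"},
-- }
--
-- def infer_category(file_name: str) -> str:
--     lower = file_name.lower()
--     if "safari" in lower:
--         return "safari"
--     if "docker" in lower:
--         return "apps"
--     if any(token in lower for token in ("foto", "zobrazh", "video", "screen", "znimok", "jesti", "zhesti")):
--         return "media"
--     if any(token in lower for token in ("klaviatura", "apostrof", "krapku", "movu", "symbol", "znak", "bukva", "key_shortcuts", "lapki", "tire", "duzhki")):
--         return "keyboard"
--     if any(token in lower for token in ("file", "papku", "shukati", "storage", "pamiat", "finder", "delete")):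
--         return "files"
--     if any(token in lower for token in ("program", "soft", "docker")):
--         return "apps"
--     return "text"
--
-- def extract_backlink(aside_links: List[Dict[str, str]], file_name: str) -> Dict[str, str]:
--     category_link = CATEGORY_PAGES[infer_category(file_name)]
--     if category_link["href"] != file_name:
--         return {"href": category_link["href"], "label": f"Повернутися: {category_link['label']}"}
--
--     for link in aside_links:
--         if link["href"] != file_name:
--             return {"href": link["href"], "label": f"Повернутися: {link['label']}"}
--     return {"href": "index.html#guides", "label": "Повернутися до гайдів"}
-- ===== SOURCE B (Python) =====
-- from typing import Dict, List
--
-- CATEGORY_PAGES = {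
--     "text": {"href": "robota-z-textom-na-mac.html", "label": "Робота з текстом на мак"},
--     "files": {"href": "robota-z-faylami-na-mac.html", "label": "Робота з файлами на мак"},
--     "apps": {"href": "robota-z-programami-na-mac.html", "label": "Робота з програмами на мак"},
--     "keyboard": {"href": "klaviatura_mac.html", "label": "Клавіатура Mac"},
--     "safari": {"href": "poradi-brauzer-safari-na-mak.html", "label": "Поради по Safari"},
--     "media": {"href": "robota_z_foto_na_mac.html", "label": "Медіа та система"},
-- }
--
-- # priority-ranked categories; index 6 is the default when no token matches
-- CATEGORIES = ("safari", "apps", "media", "keyboard", "files", "apps", "text")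
--
-- # flat token table: token -> priority rank; the lowest matched rank decides the category
-- TOKEN_RANK = [
--     ("safari", 0),
--     ("docker", 1),
--     ("foto", 2), ("zobrazh", 2), ("video", 2), ("screen", 2), ("znimok", 2),
--     ("jesti", 2), ("zhesti", 2),
--     ("klaviatura", 3), ("apostrof", 3), ("krapku", 3), ("movu", 3), ("symbol", 3),
--     ("znak", 3), ("bukva", 3), ("key_shortcuts", 3), ("lapki", 3), ("tire", 3), ("duzhki", 3),
--     ("file", 4), ("papku", 4), ("shukati", 4), ("storage", 4), ("pamiat", 4),
--     ("finder", 4), ("delete", 4),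
--     ("program", 5), ("soft", 5), ("docker", 5),
-- ]
--
-- def _category(file_name: str) -> str:
--     lower = file_name.lower()
--     best = len(CATEGORIES) - 1
--     for token, rank in TOKEN_RANK:
--         if rank < best and token in lower:
--             best = rank
--     return CATEGORIES[best]
--
-- def _choose(cands: List[Dict[str, str]], file_name: str) -> Dict[str, str]:
--     cand = next((c for c in cands if c["href"] != file_name), None)
--     if cand is None:
--         return {"href": "index.html#guides", "label": "Повернутися до гайдів"}
--     return {"href": cand["href"], "label": f"Повернутися: {cand['label']}"}
--
-- def extract_backlink(aside_links: List[Dict[str, str]], file_name: str) -> Dict[str, str]: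
--     return _choose([CATEGORY_PAGES[_category(file_name)], *aside_links], file_name)
-- ===== Notes on version B (the rewrite author's own statement) =====
-- stated objective: alternative
-- what changed: infer_category's short-circuiting if/any cascade is replaced by an argmin scan over a flat token->rank table (lowest matched rank decides, read from a CATEGORIES tuple), and the separate category-page branch plus aside-links for-loop collapse into one first-match pass over [page, *aside_links] with the index.html fallback as the loop's exhaustion case.
import Mathlib
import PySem

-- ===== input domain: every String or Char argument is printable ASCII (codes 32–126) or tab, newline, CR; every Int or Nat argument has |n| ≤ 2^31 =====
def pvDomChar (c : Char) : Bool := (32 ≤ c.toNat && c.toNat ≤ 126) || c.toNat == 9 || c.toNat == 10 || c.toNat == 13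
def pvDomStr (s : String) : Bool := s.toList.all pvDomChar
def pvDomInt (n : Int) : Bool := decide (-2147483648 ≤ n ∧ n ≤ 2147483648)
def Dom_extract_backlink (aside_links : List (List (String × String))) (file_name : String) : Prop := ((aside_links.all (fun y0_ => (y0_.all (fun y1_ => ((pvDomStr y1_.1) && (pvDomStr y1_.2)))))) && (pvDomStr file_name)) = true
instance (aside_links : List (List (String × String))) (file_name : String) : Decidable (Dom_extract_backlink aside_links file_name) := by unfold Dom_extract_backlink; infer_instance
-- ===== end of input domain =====

-- B replaces the short-circuiting if/any cascade by an argmin scan over a flat token→rank table and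
-- merges the category-page branch and the aside-links loop into one pass over [page, *aside_links].

-- ===== PORT A =====
def categoryPages : PySem.Dict String (PySem.Dict String String) :=
  PySem.Dict.mk
    [("text", PySem.Dict.mk [("href", "robota-z-textom-na-mac.html"), ("label", "Робота з текстом на мак")]),
     ("files", PySem.Dict.mk [("href", "robota-z-faylami-na-mac.html"), ("label", "Робота з файлами на мак")]),
     ("apps", PySem.Dict.mk [("href", "robota-z-programami-na-mac.html"), ("label", "Робота з програмами на мак")]),
     ("keyboard", PySem.Dict.mk [("href", "klaviatura_mac.html"), ("label", "Клавіатура Mac")]),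
     ("safari", PySem.Dict.mk [("href", "poradi-brauzer-safari-na-mak.html"), ("label", "Поради по Safari")]),
     ("media", PySem.Dict.mk [("href", "robota_z_foto_na_mac.html"), ("label", "Медіа та система")])]

def inferCategoryA (file_name : String) : String :=
  let lower := PySem.Str.lower file_name
  if PySem.Str.isIn "safari" lower then "safari"
  else if PySem.Str.isIn "docker" lower then "apps"
  else if ["foto", "zobrazh", "video", "screen", "znimok", "jesti", "zhesti"].any (fun t => PySem.Str.isIn t lower) then "media"
  else if ["klaviatura", "apostrof", "krapku", "movu", "symbol", "znak", "bukva", "key_shortcuts", "lapki", "tire", "duzhki"].any (fun t => PySem.Str.isIn t lower) then "keyboard"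
  else if ["file", "papku", "shukati", "storage", "pamiat", "finder", "delete"].any (fun t => PySem.Str.isIn t lower) then "files"
  else if ["program", "soft", "docker"].any (fun t => PySem.Str.isIn t lower) then "apps"
  else "text"

-- the for-loop over aside_links (KeyError, i.e. get? = none, is outside Pre_; getD "" is a totalizing default there)
def loopA (aside_links : List (List (String × String))) (file_name : String) : List (String × String) :=
  match aside_links with
  | [] => [("href", "index.html#guides"), ("label", "Повернутися до гайдів")]
  | link :: rest =>
    let d := PySem.Dict.mk link
    if (d.get? "href").getD "" ≠ file_name then
      [("href", (d.get? "href").getD ""), ("label", "Повернутися: " ++ (d.get? "label").getD "")]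
    else loopA rest file_name

def extract_backlink (aside_links : List (List (String × String))) (file_name : String) : List (String × String) :=
  let category_link := (categoryPages.get? (inferCategoryA file_name)).getD (PySem.Dict.mk [])
  if (category_link.get? "href").getD "" ≠ file_name then
    [("href", (category_link.get? "href").getD ""), ("label", "Повернутися: " ++ (category_link.get? "label").getD "")]
  else loopA aside_links file_name

-- ===== PORT B =====
def categoryPagesB : List (String × List (String × String)) :=
  [("text", [("href", "robota-z-textom-na-mac.html"), ("label", "Робота з текстом на мак")]),
   ("files", [("href", "robota-z-faylami-na-mac.html"), ("label", "Робота з файлами на мак")]),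
   ("apps", [("href", "robota-z-programami-na-mac.html"), ("label", "Робота з програмами на мак")]),
   ("keyboard", [("href", "klaviatura_mac.html"), ("label", "Клавіатура Mac")]),
   ("safari", [("href", "poradi-brauzer-safari-na-mak.html"), ("label", "Поради по Safari")]),
   ("media", [("href", "robota_z_foto_na_mac.html"), ("label", "Медіа та система")])]

-- CATEGORIES: priority-ranked, index 6 = default
def categoriesB : List String := ["safari", "apps", "media", "keyboard", "files", "apps", "text"]

-- TOKEN_RANK: flat token table, the lowest matched rank decides
def tokenRankB : List (String × Nat) :=
  [("safari", 0),
   ("docker", 1),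
   ("foto", 2), ("zobrazh", 2), ("video", 2), ("screen", 2), ("znimok", 2), ("jesti", 2), ("zhesti", 2),
   ("klaviatura", 3), ("apostrof", 3), ("krapku", 3), ("movu", 3), ("symbol", 3), ("znak", 3), ("bukva", 3),
   ("key_shortcuts", 3), ("lapki", 3), ("tire", 3), ("duzhki", 3),
   ("file", 4), ("papku", 4), ("shukati", 4), ("storage", 4), ("pamiat", 4), ("finder", 4), ("delete", 4),
   ("program", 5), ("soft", 5), ("docker", 5)]

def categoryB (file_name : String) : String :=
  let lower := PySem.Str.lower file_name
  let best := tokenRankB.foldl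
    (fun best tr => if tr.2 < best ∧ PySem.Str.isIn tr.1 lower then tr.2 else best)
    (categoriesB.length - 1)
  (categoriesB[best]?).getD ""   -- CATEGORIES[best]; best ≤ 6 always, getD totalizes the in-range index

-- CATEGORY_PAGES[_category(file_name)]
def pageOfB (file_name : String) : List (String × String) :=
  ((categoryPagesB.find? (fun p => p.1 == categoryB file_name)).map (fun p => p.2)).getD []

-- next((c for c in cands if c["href"] != file_name), None) and the two returns behind it
-- (missing keys, get? = none, lie outside Pre_; getD "" totalizes)
def chooseB (cands : List (List (String × String))) (file_name : String) : List (String × String) :=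
  match cands.find? (fun c => ((PySem.Dict.mk c).get? "href").getD "" != file_name) with
  | none => [("href", "index.html#guides"), ("label", "Повернутися до гайдів")]
  | some cand =>
    [("href", ((PySem.Dict.mk cand).get? "href").getD ""),
     ("label", "Повернутися: " ++ ((PySem.Dict.mk cand).get? "label").getD "")]

def extract_backlink_alt (aside_links : List (List (String × String))) (file_name : String) : List (String × String) :=
  chooseB (pageOfB file_name :: aside_links) file_name

-- ===== PRECONDITION & SPEC =====
-- the five category-page hrefs whose own names infer back to their category (the only file_names that can
-- reach the aside_links loop)
def hrefSelf : List String :=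
  ["robota-z-textom-na-mac.html", "robota-z-programami-na-mac.html", "klaviatura_mac.html",
   "poradi-brauzer-safari-na-mak.html", "robota_z_foto_na_mac.html"]

-- Pre_ excludes inputs where file_name is a self-referring category-page href and some aside link lacks an
-- "href"/"label" key: there A's loop may raise KeyError (it also drops a few such inputs where A still
-- returns because the loop stops before the defective link — see cites).
def Pre_extract_backlink (aside_links : List (List (String × String))) (file_name : String) : Prop :=
  file_name ∉ hrefSelf ∨
    ∀ link ∈ aside_links, ((PySem.Dict.mk link).contains "href" = true ∧ (PySem.Dict.mk link).contains "label" = true)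
instance (aside_links : List (List (String × String))) (file_name : String) : Decidable (Pre_extract_backlink aside_links file_name) := by unfold Pre_extract_backlink; infer_instance

def pvWitness_extract_backlink : (List (List (String × String))) × String :=
  ([[("href", "a.html"), ("label", "A")]], "guide-safari.html")

def Spec_extract_backlink (aside_links : List (List (String × String))) (file_name : String) (out : List (String × String)) : Prop := out = extract_backlink_alt aside_links file_name
instance (aside_links : List (List (String × String))) (file_name : String) (out : List (String × String)) : Decidable (Spec_extract_backlink aside_links file_name out) := by unfold Spec_extract_backlink; infer_instance

-- ===== CLAIM (what is proved, stated in full; the proofs are below) =====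
def Claim_equal_extract_backlink : Prop := ∀ (aside_links : List (List (String × String))) (file_name : String), Dom_extract_backlink aside_links file_name → Pre_extract_backlink aside_links file_name → Spec_extract_backlink aside_links file_name (extract_backlink aside_links file_name)

-- ===== LEMMAS AND PROOFS =====

-- a constant-rank segment of B's argmin fold acts like one grouped 'any' test
lemma fold_min_const (lower : String) (r : Nat) (ts : List String) : ∀ b : Nat,
    (ts.map (fun t => (t, r))).foldl
      (fun best tr => if tr.2 < best ∧ PySem.Str.isIn tr.1 lower then tr.2 else best) b
    = if r < b ∧ ts.any (fun t => PySem.Str.isIn t lower) then r else b := by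
  induction ts with
  | nil => intro b; simp
  | cons t ts ih =>
    intro b
    rw [List.map_cons, List.foldl_cons, ih, List.any_cons]
    cases ht : PySem.Str.isIn t lower with
    | false =>
      simp only [Bool.false_or, Bool.false_eq_true, and_false, if_false]
    | true =>
      by_cases hb : r < b
      · simp only [hb, and_true, if_pos, Bool.true_or, Nat.lt_irrefl, false_and, if_neg, not_false_eq_true]
      · simp only [hb, false_and, if_neg, not_false_eq_true, Bool.true_or]

-- B's flat token table is A's six token groups, each tagged with its rank
lemma tokenRank_split : tokenRankB =
    (["safari"].map (fun t => (t, 0))) ++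
    (["docker"].map (fun t => (t, 1))) ++
    (["foto", "zobrazh", "video", "screen", "znimok", "jesti", "zhesti"].map (fun t => (t, 2))) ++
    (["klaviatura", "apostrof", "krapku", "movu", "symbol", "znak", "bukva", "key_shortcuts", "lapki", "tire", "duzhki"].map (fun t => (t, 3))) ++
    (["file", "papku", "shukati", "storage", "pamiat", "finder", "delete"].map (fun t => (t, 4))) ++
    (["program", "soft", "docker"].map (fun t => (t, 5))) := by rfl

-- the cascade and the argmin scan pick the same category (truth table over the six group tests)
lemma cat_eq (f : String) : inferCategoryA f = categoryB f := by
  have e1 : PySem.Str.isIn "safari" (PySem.Str.lower f) = (["safari"] : List String).any (fun t => PySem.Str.isIn t (PySem.Str.lower f)) := by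
    rw [List.any_cons, List.any_nil, Bool.or_false]
  have e2 : PySem.Str.isIn "docker" (PySem.Str.lower f) = (["docker"] : List String).any (fun t => PySem.Str.isIn t (PySem.Str.lower f)) := by
    rw [List.any_cons, List.any_nil, Bool.or_false]
  simp only [inferCategoryA, categoryB, tokenRank_split, List.foldl_append, fold_min_const]
  rw [e1, e2]
  generalize (["safari"] : List String).any (fun t => PySem.Str.isIn t (PySem.Str.lower f)) = g0
  generalize (["docker"] : List String).any (fun t => PySem.Str.isIn t (PySem.Str.lower f)) = g1
  generalize (["foto", "zobrazh", "video", "screen", "znimok", "jesti", "zhesti"] : List String).any (fun t => PySem.Str.isIn t (PySem.Str.lower f)) = g2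
  generalize (["klaviatura", "apostrof", "krapku", "movu", "symbol", "znak", "bukva", "key_shortcuts", "lapki", "tire", "duzhki"] : List String).any (fun t => PySem.Str.isIn t (PySem.Str.lower f)) = g3
  generalize (["file", "papku", "shukati", "storage", "pamiat", "finder", "delete"] : List String).any (fun t => PySem.Str.isIn t (PySem.Str.lower f)) = g4
  generalize (["program", "soft", "docker"] : List String).any (fun t => PySem.Str.isIn t (PySem.Str.lower f)) = g5
  revert g0 g1 g2 g3 g4 g5
  decide

-- A's nested-dict lookup equals B's association-list lookup, for every category string
lemma page_eq (c : String) :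
    (categoryPages.get? c).getD (PySem.Dict.mk []) =
      PySem.Dict.mk (((categoryPagesB.find? (fun p => p.1 == c)).map (fun p => p.2)).getD []) := by
  simp only [categoryPages, categoryPagesB]
  cases h1 : ("text" : String) == c <;>
  cases h2 : ("files" : String) == c <;>
  cases h3 : ("apps" : String) == c <;>
  cases h4 : ("keyboard" : String) == c <;>
  cases h5 : ("safari" : String) == c <;>
  cases h6 : ("media" : String) == c <;>
  simp [PySem.Dict.get?, h1, h2, h3, h4, h5, h6]

-- A's aside-links loop is B's first-match search
lemma loop_eq (file_name : String) (links : List (List (String × String))) :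
    loopA links file_name = chooseB links file_name := by
  induction links with
  | nil => rfl
  | cons l rest ih =>
    rw [loopA, chooseB, List.find?_cons]
    by_cases hc : ((PySem.Dict.mk l).get? "href").getD "" = file_name
    · simp only [hc, bne_self_eq_false, ne_eq, not_true_eq_false, if_false, ih, chooseB]
    · have hb : (((PySem.Dict.mk l).get? "href").getD "" != file_name) = true := bne_iff_ne.mpr hc
      rw [hb]
      simp [hc]

-- the category-page branch in front of A's loop is the head step of B's first-match search
lemma head_step (pl : List (String × String)) (al : List (List (String × String))) (fn : String) :
    (if ((PySem.Dict.mk pl).get? "href").getD "" ≠ fn then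
       [("href", ((PySem.Dict.mk pl).get? "href").getD ""), ("label", "Повернутися: " ++ ((PySem.Dict.mk pl).get? "label").getD "")]
     else loopA al fn)
    = chooseB (pl :: al) fn := by
  rw [chooseB, List.find?_cons]
  by_cases hc : ((PySem.Dict.mk pl).get? "href").getD "" = fn
  · simp only [hc, bne_self_eq_false, ne_eq, not_true_eq_false, if_false, loop_eq, chooseB]
  · have hb : (((PySem.Dict.mk pl).get? "href").getD "" != fn) = true := bne_iff_ne.mpr hc
    rw [hb]
    simp [hc]

-- A's page lookup is B's pageOfB, as dicts
lemma pageOf_eq (fn : String) :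
    (categoryPages.get? (inferCategoryA fn)).getD (PySem.Dict.mk []) = PySem.Dict.mk (pageOfB fn) := by
  rw [pageOfB, cat_eq]
  exact page_eq (categoryB fn)

lemma ports_eq (aside_links : List (List (String × String))) (file_name : String) :
    extract_backlink aside_links file_name = extract_backlink_alt aside_links file_name := by
  rw [extract_backlink, extract_backlink_alt, pageOf_eq]
  exact head_step _ _ _

-- ===== VERDICT (by name: the statement is the Claim_ definition above) =====
theorem extract_backlink_spec : Claim_equal_extract_backlink := by
  intro aside_links file_name _ _
  unfold Spec_extract_backlink
  exact ports_eq aside_links file_name
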